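-- pv_equiv track=rewrite | github.com/SoHu-Labs/unsubscribe | src/unsubscribe/unsubscribe_oneclick.py | parse_list_unsubscribe
-- ===== SOURCE A (Python) =====
-- def parse_list_unsubscribe(header_value: str) -> list[str]:
--     """
--     Parse a ``List-Unsubscribe`` header into cleaned ``https`` / ``http`` / ``mailto`` URIs.
--
--     Handles comma-separated lists, optional angle brackets, and folded whitespace.
--     Unrecognized tokens are skipped.
--     """
--     raw = header_value.replace("\r\n", " ").replace("\n", " ").strip()
--     if not raw:
--         return []
--
--     parts = [p.strip() for p in raw.split(",")]
--     out: list[str] = []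
--     for part in parts:
--         token = part.strip()
--         if len(token) >= 2 and token[0] == "<" and token[-1] == ">":
--             token = token[1:-1].strip()
--         if not token:
--             continue
--         lower = token.lower()
--         if lower.startswith("https://"):
--             out.append("https://" + token[len("https://") :])
--         elif lower.startswith("http://"):
--             out.append("http://" + token[len("http://") :])
--         elif lower.startswith("mailto:"):
--             out.append("mailto:" + token[len("mailto:") :])
--     return out
-- ===== SOURCE B (Python) =====
-- import re
--
-- _SCHEME_RE = re.compile(r'(https://|http://|mailto:)(.*)', re.I | re.S)
--
--
-- def _flush(buf, out):
--     token = ''.join(buf).strip()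
--     if len(token) >= 2 and token[0] == '<' and token[-1] == '>':
--         token = token[1:-1].strip()
--     m = _SCHEME_RE.match(token)
--     if m:
--         out.append(m.group(1).lower() + m.group(2))
--
--
-- def parse_list_unsubscribe(header_value: str) -> list[str]:
--     out = []
--     buf = []
--     i = 0
--     n = len(header_value)
--     while i < n:
--         c = header_value[i]
--         if c == '\r' and header_value[i + 1:i + 2] == '\n':
--             c = ' '
--             i += 1
--         elif c == '\n':
--             c = ' '
--         if c == ',':
--             _flush(buf, out)
--             buf = []
--         else:
--             buf.append(c)
--         i += 1
--     _flush(buf, out)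
--     return out
-- ===== Notes on version B (the rewrite author's own statement) =====
-- stated objective: alternative
-- what changed: A's staged pipeline (two whole-string replace passes, strip, split on commas, list-comprehension strip, then a for-loop with an if/elif chain of hard-coded startswith prefix tests and length slicing) becomes a single left-to-right character scan with a token buffer that normalizes CRLF/LF via lookahead and flushes on commas, each flushed token being recognized by one case-insensitive regex alternation whose lowered group(1) plus group(2) is the output.
import Mathlib
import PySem

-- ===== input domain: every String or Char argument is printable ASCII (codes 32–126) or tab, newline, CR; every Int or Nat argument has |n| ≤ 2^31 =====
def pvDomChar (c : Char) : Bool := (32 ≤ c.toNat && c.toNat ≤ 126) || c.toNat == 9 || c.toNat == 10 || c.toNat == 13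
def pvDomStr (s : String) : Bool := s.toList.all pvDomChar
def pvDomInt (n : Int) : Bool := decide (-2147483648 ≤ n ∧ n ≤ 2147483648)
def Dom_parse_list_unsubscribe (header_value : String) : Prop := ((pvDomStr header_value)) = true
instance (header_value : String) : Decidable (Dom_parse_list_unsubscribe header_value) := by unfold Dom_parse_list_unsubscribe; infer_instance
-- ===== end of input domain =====

-- B replaces A's staged pipeline (two replace passes, strip, comma split, per-part loop with a
-- startswith if/elif chain) by one character scan with a token buffer, flushing on commas and
-- recognizing each token with a single case-insensitive scheme alternation (objective: alternative).

-- ===== PORT A =====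
def parse_list_unsubscribe (header_value : String) : List String :=
  let raw := PySem.Chars.strip (PySem.Chars.replace
    (PySem.Chars.replace header_value.toList ['\r', '\n'] [' ']) ['\n'] [' '])
  if raw = [] then []
  else
    let parts := (PySem.Chars.splitOn raw [',']).map PySem.Chars.strip
    parts.foldl (fun out part =>
      let token := PySem.Chars.strip part
      let token :=
        if 2 ≤ token.length ∧ PySem.List.pyGet? token 0 = some '<' ∧
            PySem.List.pyGet? token (-1) = some '>' then
          PySem.Chars.strip (PySem.List.slice token (some 1) (some (-1)))
        else token
      if token = [] then out
      else
        let lower := PySem.Chars.lower token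
        if PySem.Chars.startswith lower "https://".toList then
          out ++ [String.ofList ("https://".toList ++
            PySem.List.slice token (some ("https://".toList.length : Int)) none)]
        else if PySem.Chars.startswith lower "http://".toList then
          out ++ [String.ofList ("http://".toList ++
            PySem.List.slice token (some ("http://".toList.length : Int)) none)]
        else if PySem.Chars.startswith lower "mailto:".toList then
          out ++ [String.ofList ("mailto:".toList ++
            PySem.List.slice token (some ("mailto:".toList.length : Int)) none)]
        else out) []

-- ===== PORT B =====
-- hand port of _SCHEME_RE.match (re has no PySem primitive): the regex tries the three literal
-- alternatives in order at position 0, case-insensitively (exact for this ASCII-literal pattern);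
-- group(1) is the matched prefix of the token, group(2) the rest.
def pvReMatch (token : List Char) : Option (List Char × List Char) :=
  if PySem.Chars.lower (token.take 8) = "https://".toList then some (token.take 8, token.drop 8)
  else if PySem.Chars.lower (token.take 7) = "http://".toList then some (token.take 7, token.drop 7)
  else if PySem.Chars.lower (token.take 7) = "mailto:".toList then some (token.take 7, token.drop 7)
  else none

def pvFlush (buf : List Char) (out : List String) : List String :=
  let token := PySem.Chars.strip buf
  let token :=
    if 2 ≤ token.length ∧ PySem.List.pyGet? token 0 = some '<' ∧
        PySem.List.pyGet? token (-1) = some '>' then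
      PySem.Chars.strip (PySem.List.slice token (some 1) (some (-1)))
    else token
  match pvReMatch token with
  | some (g1, g2) => out ++ [String.ofList (PySem.Chars.lower g1 ++ g2)]
  | none => out

def pvScan : List Char → List Char → List String → List String
  | [], buf, out => pvFlush buf out
  | c :: rest, buf, out =>
      -- `c == '\r' and header_value[i+1:i+2] == '\n'`: c becomes ' ' and the '\n' is consumed too
      if c = '\r' ∧ rest.take 1 = ['\n'] then pvScan (rest.drop 1) (buf ++ [' ']) out
      else
        let c := if c = '\n' then ' ' else c
        if c = ',' then pvScan rest [] (pvFlush buf out) else pvScan rest (buf ++ [c]) out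
  termination_by l => l.length
  decreasing_by all_goals simp

def parse_list_unsubscribe_alt (header_value : String) : List String :=
  pvScan header_value.toList [] []

-- ===== PRECONDITION & SPEC =====
def Spec_parse_list_unsubscribe (header_value : String) (out : List String) : Prop := out = parse_list_unsubscribe_alt header_value
instance (header_value : String) (out : List String) : Decidable (Spec_parse_list_unsubscribe header_value out) := by unfold Spec_parse_list_unsubscribe; infer_instance

-- ===== CLAIM (what is proved, stated in full; the proofs are below) =====
def Claim_equal_parse_list_unsubscribe : Prop := ∀ (header_value : String), Dom_parse_list_unsubscribe header_value → Spec_parse_list_unsubscribe header_value (parse_list_unsubscribe header_value)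

-- ===== LEMMAS AND PROOFS =====

-- the newline normalization A performs with its two replace passes, as one recursive pass
def pvR1 : List Char → List Char
  | [] => []
  | c :: rest =>
      if c = '\r' ∧ rest.take 1 = ['\n'] then ' ' :: pvR1 (rest.drop 1) else c :: pvR1 rest
  termination_by l => l.length
  decreasing_by all_goals simp

def pvF (c : Char) : Char := if c = '\n' then ' ' else c

def pvNorm : List Char → List Char
  | [] => []
  | c :: rest =>
      if c = '\r' ∧ rest.take 1 = ['\n'] then ' ' :: pvNorm (rest.drop 1) else pvF c :: pvNorm rest
  termination_by l => l.length
  decreasing_by all_goals simp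

-- the comma split, as a recursive splitter with an accumulated (reversed) current chunk
def pvSplit : List Char → List Char → List (List Char)
  | cur, [] => [cur.reverse]
  | cur, c :: rest => if c = ',' then cur.reverse :: pvSplit [] rest else pvSplit (c :: cur) rest

-- the bracket-removal stage both programs apply to a stripped token
def pvBr0 (token : List Char) : List Char :=
  if 2 ≤ token.length ∧ PySem.List.pyGet? token 0 = some '<' ∧
      PySem.List.pyGet? token (-1) = some '>' then
    PySem.Chars.strip (PySem.List.slice token (some 1) (some (-1)))
  else token

-- the per-chunk contribution (0 or 1 URIs), in B's form
def pvContrib (p : List Char) : List String :=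
  match pvReMatch (pvBr0 (PySem.Chars.strip p)) with
  | some (g1, g2) => [String.ofList (PySem.Chars.lower g1 ++ g2)]
  | none => []

def pvFC (l : List Char) : List String := (pvSplit [] l).flatMap pvContrib

-- A's per-part contribution as written in A's foldl body
def pvAContrib (part : List Char) : List String :=
  let token := PySem.Chars.strip part
  let token := pvBr0 token
  if token = [] then []
  else
    let lower := PySem.Chars.lower token
    if PySem.Chars.startswith lower "https://".toList then
      [String.ofList ("https://".toList ++
        PySem.List.slice token (some ("https://".toList.length : Int)) none)]
    else if PySem.Chars.startswith lower "http://".toList then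
      [String.ofList ("http://".toList ++
        PySem.List.slice token (some ("http://".toList.length : Int)) none)]
    else if PySem.Chars.startswith lower "mailto:".toList then
      [String.ofList ("mailto:".toList ++
        PySem.List.slice token (some ("mailto:".toList.length : Int)) none)]
    else []

theorem pv_dropWhile_prefix_fixed (p : Char → Bool) (l u : List Char)
    (h : l.dropWhile p = l) (hu : u <+: l) : u.dropWhile p = u := by
  cases u with
  | nil => simp
  | cons a v =>
    rw [List.dropWhile_eq_self_iff] at h ⊢
    obtain ⟨t, rfl⟩ := hu
    simpa using h

theorem pv_strip_idem (s : List Char) :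
    PySem.Chars.strip (PySem.Chars.strip s) = PySem.Chars.strip s := by
  unfold PySem.Chars.strip PySem.Chars.rstrip PySem.Chars.lstrip
  set p := PySem.Chars.isspace with hp
  set t := List.dropWhile p s with ht
  set u := List.dropWhile p t.reverse with hu
  have htfix : t.dropWhile p = t := by rw [ht]; exact List.dropWhile_idempotent p s
  have hurev : u.reverse <+: t := by
    rw [← t.reverse_reverse]
    exact List.reverse_prefix.mpr (hu ▸ List.dropWhile_suffix p)
  have h1 : List.dropWhile p u.reverse = u.reverse :=
    pv_dropWhile_prefix_fixed p t u.reverse htfix hurev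
  have h2 : List.dropWhile p u = u := by rw [hu]; exact List.dropWhile_idempotent p t.reverse
  rw [h1, List.reverse_reverse, h2]

theorem pv_startswith_lower (token sch : List Char) :
    (PySem.Chars.startswith (PySem.Chars.lower token) sch = true) ↔
      PySem.Chars.lower (token.take sch.length) = sch := by
  rw [PySem.Chars.startswith_iff, List.prefix_iff_eq_take]
  unfold PySem.Chars.lower
  rw [List.map_take]
  exact eq_comm

-- the two token recognizers agree
theorem pv_tok_eq (t : List Char) :
    (if t = [] then ([] : List String)
     else
       if PySem.Chars.startswith (PySem.Chars.lower t) "https://".toList then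
         [String.ofList ("https://".toList ++
           PySem.List.slice t (some ("https://".toList.length : Int)) none)]
       else if PySem.Chars.startswith (PySem.Chars.lower t) "http://".toList then
         [String.ofList ("http://".toList ++
           PySem.List.slice t (some ("http://".toList.length : Int)) none)]
       else if PySem.Chars.startswith (PySem.Chars.lower t) "mailto:".toList then
         [String.ofList ("mailto:".toList ++
           PySem.List.slice t (some ("mailto:".toList.length : Int)) none)]
       else []) =
      (match pvReMatch t with
       | some (g1, g2) => [String.ofList (PySem.Chars.lower g1 ++ g2)]
       | none => []) := by
  by_cases h0 : t = []
  · subst h0; decide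
  · rw [if_neg h0]
    simp only [pvReMatch]
    simp only [PySem.List.slice_from_natCast, pv_startswith_lower]
    split_ifs with h1 h2 h3 <;> simp_all

theorem pv_contribA_eq (p : List Char) : pvAContrib p = pvContrib p := by
  simp only [pvAContrib, pvContrib]
  exact pv_tok_eq _

theorem pv_contrib_strip (p : List Char) : pvContrib (PySem.Chars.strip p) = pvContrib p := by
  simp only [pvContrib, pv_strip_idem]

theorem pv_contrib_of_strip_nil (p : List Char) (h : PySem.Chars.strip p = []) :
    pvContrib p = [] := by
  simp only [pvContrib, h]; decide

-- ws facts
def pvWs (w : List Char) : Prop := ∀ c ∈ w, PySem.Chars.isspace c = true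

theorem pv_ws_ne_comma {c : Char} (h : PySem.Chars.isspace c = true) : c ≠ ',' := by
  intro hc; subst hc; simp [PySem.Chars.isspace] at h

theorem pv_dropWhile_ws_append (w x : List Char) (h : pvWs w) :
    (w ++ x).dropWhile PySem.Chars.isspace = x.dropWhile PySem.Chars.isspace := by
  rw [List.dropWhile_append]
  have : w.dropWhile PySem.Chars.isspace = [] := List.dropWhile_eq_nil_iff.mpr h
  simp [this]

theorem pv_strip_ws_append (w x : List Char) (h : pvWs w) :
    PySem.Chars.strip (w ++ x) = PySem.Chars.strip x := by
  unfold PySem.Chars.strip PySem.Chars.lstrip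
  rw [pv_dropWhile_ws_append w x h]

theorem pv_rstrip_append_ws (y w : List Char) (h : pvWs w) :
    PySem.Chars.rstrip (y ++ w) = PySem.Chars.rstrip y := by
  unfold PySem.Chars.rstrip
  rw [List.reverse_append, pv_dropWhile_ws_append]
  intro c hc; exact h c (List.mem_reverse.mp hc)

theorem pv_strip_append_ws (x w : List Char) (h : pvWs w) :
    PySem.Chars.strip (x ++ w) = PySem.Chars.strip x := by
  unfold PySem.Chars.strip PySem.Chars.lstrip
  rw [List.dropWhile_append]
  by_cases hx : x.dropWhile PySem.Chars.isspace = []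
  · have hw : w.dropWhile PySem.Chars.isspace = [] := List.dropWhile_eq_nil_iff.mpr h
    simp [hx, hw]
  · simp only [hx, List.isEmpty_iff]
    exact pv_rstrip_append_ws _ w h

theorem pv_strip_nil_ws (x : List Char) (h : PySem.Chars.strip x = []) : pvWs x := by
  have hx : x = x.takeWhile PySem.Chars.isspace ++ x.dropWhile PySem.Chars.isspace :=
    (List.takeWhile_append_dropWhile).symm
  have hm : PySem.Chars.rstrip (x.dropWhile PySem.Chars.isspace) = [] := h
  have : (x.dropWhile PySem.Chars.isspace).reverse.dropWhile PySem.Chars.isspace = [] := by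
    unfold PySem.Chars.rstrip at hm
    simpa using congrArg List.reverse hm
  have hmws : pvWs (x.dropWhile PySem.Chars.isspace) := by
    intro c hc
    exact List.dropWhile_eq_nil_iff.mp this c (List.mem_reverse.mpr hc)
  intro c hc
  rw [hx] at hc
  rcases List.mem_append.mp hc with h1 | h2
  · exact List.mem_takeWhile_imp h1
  · exact hmws c h2

-- === fuel lemmas characterizing A's string primitives ===
theorem pv_replace_go_rn : ∀ (fuel : Nat) (l acc : List Char), l.length ≤ fuel →
    PySem.Chars.replace.go ['\r', '\n'] [' '] fuel l acc = acc.reverse ++ pvR1 l := by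
  intro fuel
  induction fuel with
  | zero =>
    intro l acc h
    rw [List.length_eq_zero_iff.mp (Nat.le_zero.mp h)]
    simp [PySem.Chars.replace.go, pvR1]
  | succ f ih =>
    intro l acc h
    match l with
    | [] => simp [PySem.Chars.replace.go, pvR1]
    | c :: rest =>
      by_cases hc : c = '\r' ∧ rest.take 1 = ['\n']
      · obtain ⟨rfl, h2⟩ := hc
        match rest, h2 with
        | c2 :: r', h2 =>
          have hc2 : c2 = '\n' := by simpa using h2
          subst hc2
          have hp : (['\r', '\n'] : List Char).isPrefixOf ('\r' :: '\n' :: r') = true := by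
            simp [List.isPrefixOf]
          simp only [PySem.Chars.replace.go, hp, if_true]
          rw [show List.drop (['\r', '\n'] : List Char).length ('\r' :: '\n' :: r') = r' from rfl]
          rw [ih r' _ (by simp at h ⊢; omega)]
          rw [pvR1]
          simp
      · have hp : (['\r', '\n'] : List Char).isPrefixOf (c :: rest) = false := by
          cases rest with
          | nil => simp [List.isPrefixOf]
          | cons c2 r' =>
            by_cases h1 : c = '\r'
            · subst h1
              have h2 : c2 ≠ '\n' := fun hh => hc ⟨rfl, by simp [hh]⟩
              simp [List.isPrefixOf]
              exact fun hh => absurd hh.symm h2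
            · simp [List.isPrefixOf]
              exact fun hh _ => absurd hh.symm h1
        simp only [PySem.Chars.replace.go, hp, Bool.false_eq_true, if_false]
        rw [ih rest (c :: acc) (by simp at h ⊢; omega)]
        rw [pvR1]
        simp [hc]

theorem pv_replace_go_n : ∀ (fuel : Nat) (l acc : List Char), l.length ≤ fuel →
    PySem.Chars.replace.go ['\n'] [' '] fuel l acc = acc.reverse ++ l.map pvF := by
  intro fuel
  induction fuel with
  | zero =>
    intro l acc h
    rw [List.length_eq_zero_iff.mp (Nat.le_zero.mp h)]
    simp [PySem.Chars.replace.go]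
  | succ f ih =>
    intro l acc h
    match l with
    | [] => simp [PySem.Chars.replace.go]
    | c :: rest =>
      by_cases hc : c = '\n'
      · subst hc
        have hp : (['\n'] : List Char).isPrefixOf ('\n' :: rest) = true := by
          simp [List.isPrefixOf]
        simp only [PySem.Chars.replace.go, hp, if_true]
        rw [show List.drop (['\n'] : List Char).length ('\n' :: rest) = rest from rfl]
        rw [ih rest _ (by simp at h ⊢; omega)]
        simp [pvF]
      · have hp : (['\n'] : List Char).isPrefixOf (c :: rest) = false := by
          simp [List.isPrefixOf]
          exact fun hh => absurd hh.symm hc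
        simp only [PySem.Chars.replace.go, hp, Bool.false_eq_true, if_false]
        rw [ih rest (c :: acc) (by simp at h ⊢; omega)]
        simp [pvF, hc]

theorem pv_R1_map (l : List Char) : (pvR1 l).map pvF = pvNorm l := by
  induction l using pvR1.induct with
  | case1 => simp [pvR1, pvNorm]
  | case2 c rest h ih =>
    rw [pvR1, pvNorm]
    simp only [h]
    rw [List.drop_one] at ih
    simp [pvF, ih]
  | case3 c rest h ih =>
    rw [pvR1, pvNorm]
    simp [h, ih]

theorem pv_norm_eq (l : List Char) :
    PySem.Chars.replace (PySem.Chars.replace l ['\r', '\n'] [' ']) ['\n'] [' '] = pvNorm l := by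
  have h1 : PySem.Chars.replace l ['\r', '\n'] [' '] = pvR1 l := by
    unfold PySem.Chars.replace
    simp only [List.isEmpty_cons, Bool.false_eq_true, if_false]
    simpa using pv_replace_go_rn l.length l [] (le_refl _)
  rw [h1]
  unfold PySem.Chars.replace
  simp only [List.isEmpty_cons, Bool.false_eq_true, if_false]
  rw [pv_replace_go_n (pvR1 l).length (pvR1 l) [] (le_refl _)]
  simpa using pv_R1_map l

theorem pv_splitOn_go : ∀ (fuel : Nat) (l cur : List Char) (accL : List (List Char)),
    l.length < fuel →
    PySem.Chars.splitOn.go [','] fuel l cur accL = accL.reverse ++ pvSplit cur l := by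
  intro fuel
  induction fuel with
  | zero => intro l cur accL h; omega
  | succ f ih =>
    intro l cur accL h
    match l with
    | [] => simp [PySem.Chars.splitOn.go, pvSplit]
    | c :: rest =>
      by_cases hc : c = ','
      · subst hc
        have hp : ([','] : List Char).isPrefixOf (',' :: rest) = true := by
          simp [List.isPrefixOf]
        simp only [PySem.Chars.splitOn.go, hp, if_true]
        rw [show List.drop ([','] : List Char).length (',' :: rest) = rest from rfl]
        rw [ih rest [] _ (by simp at h ⊢; omega)]
        simp [pvSplit]
      · have hp : ([','] : List Char).isPrefixOf (c :: rest) = false := by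
          simp [List.isPrefixOf]
          exact fun hh => absurd hh.symm hc
        simp only [PySem.Chars.splitOn.go, hp, Bool.false_eq_true, if_false]
        rw [ih rest (c :: cur) _ (by simp at h ⊢; omega)]
        simp [pvSplit, hc]

theorem pv_splitOn_eq (l : List Char) : PySem.Chars.splitOn l [','] = pvSplit [] l := by
  unfold PySem.Chars.splitOn
  simpa using pv_splitOn_go (l.length + 1) l [] [] (by omega)

-- === split machine lemmas ===
theorem pv_split_no_comma (w : List Char) (hw : ∀ c ∈ w, c ≠ ',') : ∀ (cur : List Char),
    pvSplit cur w = [cur.reverse ++ w] := by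
  induction w with
  | nil => intro cur; simp [pvSplit]
  | cons c rest ih =>
    intro cur
    rw [pvSplit]
    rw [if_neg (hw c (by simp))]
    rw [ih (fun d hd => hw d (by simp [hd])) (c :: cur)]
    simp

theorem pv_split_append (w : List Char) (hw : ∀ c ∈ w, c ≠ ',') : ∀ (cur y : List Char),
    pvSplit cur (w ++ y) = pvSplit (w.reverse ++ cur) y := by
  induction w with
  | nil => intro cur y; simp
  | cons c rest ih =>
    intro cur y
    rw [List.cons_append, pvSplit, if_neg (hw c (by simp))]
    rw [ih (fun d hd => hw d (by simp [hd])) (c :: cur) y]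
    simp

theorem pv_ws_reverse (w : List Char) (h : pvWs w) : pvWs w.reverse := by
  intro c hc; exact h c (List.mem_reverse.mp hc)

theorem pv_contrib_ws_prefix (w x : List Char) (h : pvWs w) :
    pvContrib (w ++ x) = pvContrib x := by
  simp only [pvContrib, pv_strip_ws_append w x h]

theorem pv_contrib_ws_suffix (x w : List Char) (h : pvWs w) :
    pvContrib (x ++ w) = pvContrib x := by
  simp only [pvContrib, pv_strip_append_ws x w h]

theorem pv_split_ws_cur (l : List Char) : ∀ (cur w : List Char), pvWs w →
    (pvSplit (cur ++ w) l).flatMap pvContrib = (pvSplit cur l).flatMap pvContrib := by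
  induction l with
  | nil =>
    intro cur w hw
    simp only [pvSplit, List.flatMap_cons, List.flatMap_nil, List.reverse_append]
    rw [pv_contrib_ws_prefix w.reverse cur.reverse (pv_ws_reverse w hw)]
  | cons c rest ih =>
    intro cur w hw
    by_cases hc : c = ','
    · subst hc
      simp only [pvSplit, if_true, List.flatMap_cons, List.reverse_append]
      rw [pv_contrib_ws_prefix w.reverse cur.reverse (pv_ws_reverse w hw)]
    · simp only [pvSplit, if_neg hc]
      have : c :: (cur ++ w) = (c :: cur) ++ w := rfl
      rw [this, ih (c :: cur) w hw]

theorem pv_split_ws_tail (l : List Char) : ∀ (cur w : List Char), pvWs w →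
    (pvSplit cur (l ++ w)).flatMap pvContrib = (pvSplit cur l).flatMap pvContrib := by
  induction l with
  | nil =>
    intro cur w hw
    rw [List.nil_append, pv_split_no_comma w (fun c hc => pv_ws_ne_comma (hw c hc)) cur]
    simp only [pvSplit, List.flatMap_cons, List.flatMap_nil]
    rw [show cur.reverse ++ w = cur.reverse ++ w from rfl,
      pv_contrib_ws_suffix cur.reverse w hw]
  | cons c rest ih =>
    intro cur w hw
    by_cases hc : c = ','
    · subst hc
      simp only [List.cons_append, pvSplit, if_true, List.flatMap_cons]
      rw [ih [] w hw]
    · simp only [List.cons_append, pvSplit, if_neg hc]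
      exact ih (c :: cur) w hw

theorem pv_FC_lstrip (n : List Char) : pvFC (PySem.Chars.lstrip n) = pvFC n := by
  unfold pvFC
  have hdec : n = n.takeWhile PySem.Chars.isspace ++ n.dropWhile PySem.Chars.isspace :=
    (List.takeWhile_append_dropWhile).symm
  have hws : pvWs (n.takeWhile PySem.Chars.isspace) := fun c hc => List.mem_takeWhile_imp hc
  conv_rhs => rw [hdec]
  rw [pv_split_append _ (fun c hc => pv_ws_ne_comma (hws c hc)) [] _]
  rw [List.append_nil]
  have := pv_split_ws_cur (n.dropWhile PySem.Chars.isspace) []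
    (n.takeWhile PySem.Chars.isspace).reverse (pv_ws_reverse _ hws)
  rw [List.nil_append] at this
  rw [this]
  rfl

theorem pv_FC_rstrip (m : List Char) : pvFC (PySem.Chars.rstrip m) = pvFC m := by
  unfold pvFC
  have hdec : m = PySem.Chars.rstrip m ++ (m.reverse.takeWhile PySem.Chars.isspace).reverse := by
    unfold PySem.Chars.rstrip
    rw [← List.reverse_append, List.takeWhile_append_dropWhile, List.reverse_reverse]
  have hws : pvWs (m.reverse.takeWhile PySem.Chars.isspace).reverse := by
    apply pv_ws_reverse
    exact fun c hc => List.mem_takeWhile_imp hc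
  conv_rhs => rw [hdec]
  rw [pv_split_ws_tail (PySem.Chars.rstrip m) [] _ hws]

theorem pv_FC_strip (n : List Char) : pvFC (PySem.Chars.strip n) = pvFC n := by
  unfold PySem.Chars.strip
  rw [pv_FC_rstrip, pv_FC_lstrip]

-- === B machine lemmas ===
theorem pv_flush_eq (buf : List Char) (out : List String) :
    pvFlush buf out = out ++ pvContrib buf := by
  have hdef : pvFlush buf out = (match pvReMatch (pvBr0 (PySem.Chars.strip buf)) with
      | some (g1, g2) => out ++ [String.ofList (PySem.Chars.lower g1 ++ g2)]
      | none => out) := rfl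
  rw [hdef]
  cases h : pvReMatch (pvBr0 (PySem.Chars.strip buf)) with
  | none => simp [pvContrib, h]
  | some g => obtain ⟨g1, g2⟩ := g; simp [pvContrib, h]

def pvScan2 : List Char → List Char → List String → List String
  | [], buf, out => pvFlush buf out
  | c :: rest, buf, out =>
      if c = ',' then pvScan2 rest [] (pvFlush buf out) else pvScan2 rest (buf ++ [c]) out

theorem pv_scan_norm : ∀ (l buf : List Char) (out : List String),
    pvScan l buf out = pvScan2 (pvNorm l) buf out := by
  intro l buf out
  induction l, buf, out using pvScan.induct with
  | case1 buf out => simp [pvScan, pvScan2, pvNorm]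
  | case2 c rest buf out h ih =>
    rw [pvScan, pvNorm]
    rw [if_pos h, if_pos h]
    rw [ih]
    rw [pvScan2, if_neg (by decide : ¬(' ' : Char) = ',')]
  | case3 c rest buf out h c1 h2 ih =>
    have hc : (if c = '\n' then ' ' else c) = ',' := h2
    rw [pvScan, pvNorm, if_neg h, if_neg h]
    show (if (if c = '\n' then ' ' else c) = ',' then pvScan rest [] (pvFlush buf out)
      else pvScan rest (buf ++ [if c = '\n' then ' ' else c]) out) = _
    rw [if_pos hc, ih, pvScan2]
    rw [if_pos (show pvF c = ',' from hc)]
  | case4 c rest buf out h c1 h2 ih =>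
    have hc : ¬ (if c = '\n' then ' ' else c) = ',' := h2
    rw [pvScan, pvNorm, if_neg h, if_neg h]
    show (if (if c = '\n' then ' ' else c) = ',' then pvScan rest [] (pvFlush buf out)
      else pvScan rest (buf ++ [if c = '\n' then ' ' else c]) out) = _
    rw [if_neg hc]
    rw [show (buf ++ [if c = '\n' then ' ' else c]) = buf ++ [c1] from rfl, ih, pvScan2]
    rw [if_neg (show ¬ pvF c = ',' from hc)]
    rfl

theorem pv_scan2_eq : ∀ (l : List Char), ∀ (buf : List Char) (out : List String),
    pvScan2 l buf out = out ++ (pvSplit buf.reverse l).flatMap pvContrib := by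
  intro l
  induction l with
  | nil =>
    intro buf out
    rw [pvScan2, pv_flush_eq]
    simp [pvSplit]
  | cons c rest ih =>
    intro buf out
    by_cases hc : c = ','
    · subst hc
      rw [pvScan2]
      simp only [if_true]
      rw [ih [] (pvFlush buf out), pv_flush_eq]
      simp [pvSplit]
    · rw [pvScan2]
      rw [if_neg hc, ih (buf ++ [c]) out]
      simp only [pvSplit, if_neg hc, List.reverse_append]
      simp

-- === A side: foldl to flatMap ===
theorem pv_A_eq (raw : List Char) :
    ((PySem.Chars.splitOn raw [',']).map PySem.Chars.strip).foldl (fun out part =>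
      let token := PySem.Chars.strip part
      let token :=
        if 2 ≤ token.length ∧ PySem.List.pyGet? token 0 = some '<' ∧
            PySem.List.pyGet? token (-1) = some '>' then
          PySem.Chars.strip (PySem.List.slice token (some 1) (some (-1)))
        else token
      if token = [] then out
      else
        let lower := PySem.Chars.lower token
        if PySem.Chars.startswith lower "https://".toList then
          out ++ [String.ofList ("https://".toList ++
            PySem.List.slice token (some ("https://".toList.length : Int)) none)]
        else if PySem.Chars.startswith lower "http://".toList then
          out ++ [String.ofList ("http://".toList ++
            PySem.List.slice token (some ("http://".toList.length : Int)) none)]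
        else if PySem.Chars.startswith lower "mailto:".toList then
          out ++ [String.ofList ("mailto:".toList ++
            PySem.List.slice token (some ("mailto:".toList.length : Int)) none)]
        else out) [] = pvFC raw := by
  rw [pv_splitOn_eq]
  refine Eq.trans (PySem.List.foldl_congr_mem _ _
    (fun out part => out ++ pvAContrib part) _ ?_) ?_
  · intro acc x _
    simp only [pvAContrib, pvBr0]
    split_ifs <;> simp
  · rw [PySem.List.foldl_append_eq_flatMap]
    rw [List.flatMap_map]
    simp only [pv_contribA_eq, pv_contrib_strip]
    rfl

-- ===== VERDICT (by name: the statement is the Claim_ definition above) =====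
theorem parse_list_unsubscribe_spec : Claim_equal_parse_list_unsubscribe := by
  intro hv _
  unfold Spec_parse_list_unsubscribe parse_list_unsubscribe parse_list_unsubscribe_alt
  have hB : pvScan hv.toList [] [] = pvFC (pvNorm hv.toList) := by
    rw [pv_scan_norm, pv_scan2_eq]
    simp [pvFC]
  rw [hB]
  simp only [pv_norm_eq]
  by_cases h : PySem.Chars.strip (pvNorm hv.toList) = []
  · rw [if_pos h]
    have hws : pvWs (pvNorm hv.toList) := pv_strip_nil_ws _ h
    unfold pvFC
    rw [pv_split_no_comma _ (fun c hc => pv_ws_ne_comma (hws c hc)) []]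
    simp [pv_contrib_of_strip_nil _ h]
  · rw [if_neg h]
    rw [pv_A_eq]
    exact pv_FC_strip _
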